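-- pv_equiv track=rewrite | github.com/tannonk/two-headed-master | evaluation/chars_to_words.py | compress_words
-- ===== SOURCE A (Python) =====
-- def compress_words(utt):
--     words = []
--     cur_word = []
--     for char in utt.split():
--         if char.endswith('@'):
--             cur_word.append(char[:-1])
--             words.append(''.join(cur_word))
--             cur_word = []
--         else:
--             cur_word.append(char)
--
--     return ' '.join(words)
-- ===== SOURCE B (Python) =====
-- def compress_words(utt):
--     # Delimiter-driven: repeatedly find the first '@'-terminated token, emit the
--     # slice before it (joined) plus that token minus its '@', and continue after it.
--     toks = utt.split()
--     words = []
--     while True: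
--         j = next((i for i, t in enumerate(toks) if t.endswith('@')), None)
--         if j is None:
--             return ' '.join(words)
--         words.append(''.join(toks[:j]) + toks[j][:-1])
--         toks = toks[j + 1:]
-- ===== Notes on version B (the rewrite author's own statement) =====
-- stated objective: alternative
-- what changed: B replaces A's per-token buffer/flush accumulator scan with a delimiter-driven loop: repeatedly find the next '@'-terminated token, emit the joined slice before it plus that token minus its '@', and continue on the remainder after it.
import Mathlib
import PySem

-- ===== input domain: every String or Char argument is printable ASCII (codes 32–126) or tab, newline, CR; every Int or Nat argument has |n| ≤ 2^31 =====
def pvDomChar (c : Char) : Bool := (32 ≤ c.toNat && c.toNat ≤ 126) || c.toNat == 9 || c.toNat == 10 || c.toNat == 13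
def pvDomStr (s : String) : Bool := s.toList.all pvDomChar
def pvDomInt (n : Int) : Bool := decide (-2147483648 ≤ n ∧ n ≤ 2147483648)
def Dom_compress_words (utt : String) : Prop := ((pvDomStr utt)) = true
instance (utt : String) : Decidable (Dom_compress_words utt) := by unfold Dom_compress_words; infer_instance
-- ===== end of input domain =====

-- B rewrites A's buffer/flush accumulator scan as a delimiter-driven loop (find next '@'-token, slice, join); alternative decomposition, same return value.

-- ===== PORT A =====
def compress_words (utt : String) : String :=
  let st := (PySem.Str.split₀ utt).foldl
    (fun (p : List String × List String) char =>
      if PySem.Str.endswith char "@" then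
        (p.1 ++ [PySem.Str.join "" (p.2 ++ [PySem.Str.slice char none (some (-1))])], [])
      else
        (p.1, p.2 ++ [char]))
    ([], [])
  PySem.Str.join " " st.1

-- ===== PORT B =====
-- port of B's `next((i for i, t in enumerate(toks) if t.endswith('@')), None)`
def pyFindAt (j : Nat) (toks : List String) : Option (Nat × String) :=
  match toks with
  | [] => none
  | t :: r => if PySem.Str.endswith t "@" then some (j, t) else pyFindAt (j + 1) r

-- termination helper for the while-loop port below
theorem pyFindAt_lt (k : Nat) (toks : List String) (j : Nat) (t : String)
    (h : pyFindAt k toks = some (j, t)) : j < k + toks.length := by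
  induction toks generalizing k with
  | nil => simp [pyFindAt] at h
  | cons a r ih =>
      simp only [pyFindAt] at h
      split at h
      · simp_all
      · have := ih (k + 1) h
        simp only [List.length_cons]; omega

-- port of B's `while True:` loop (state: words, toks)
def goB (words toks : List String) : String :=
  match h : pyFindAt 0 toks with
  | none => PySem.Str.join " " words
  | some (j, t) =>
      goB (words ++ [PySem.Str.join "" (PySem.List.slice toks none (some (j : Int))) ++
                     PySem.Str.slice t none (some (-1))])
          (PySem.List.slice toks (some ((j : Int) + 1)) none)
termination_by toks.length
decreasing_by
  have hj := pyFindAt_lt 0 toks j t h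
  have hc : ((j : Int) + 1) = ((j + 1 : Nat) : Int) := by push_cast; ring
  rw [hc, PySem.List.slice_from_natCast]
  simp only [List.length_drop]
  omega

def compress_words_alt (utt : String) : String := goB [] (PySem.Str.split₀ utt)

-- ===== PRECONDITION & SPEC =====
def Spec_compress_words (utt : String) (out : String) : Prop := out = compress_words_alt utt
instance (utt : String) (out : String) : Decidable (Spec_compress_words utt out) := by unfold Spec_compress_words; infer_instance

-- ===== CLAIM (what is proved, stated in full; the proofs are below) =====
def Claim_equal_compress_words : Prop := ∀ (utt : String), Dom_compress_words utt → Spec_compress_words utt (compress_words utt)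

-- ===== LEMMAS AND PROOFS =====

-- reference grouping function: (emitted words, leftover buffer) of A's loop started with buffer `cur`
def pvGL (cur toks : List String) : List String × List String :=
  match toks with
  | [] => ([], cur)
  | t :: r =>
      if PySem.Str.endswith t "@" then
        ((PySem.Str.join "" (cur ++ [PySem.Str.slice t none (some (-1))])) :: (pvGL [] r).1, (pvGL [] r).2)
      else
        pvGL (cur ++ [t]) r

theorem foldA_eq (toks ws cur : List String) :
    toks.foldl
      (fun (p : List String × List String) char =>
        if PySem.Str.endswith char "@" then
          (p.1 ++ [PySem.Str.join "" (p.2 ++ [PySem.Str.slice char none (some (-1))])], [])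
        else
          (p.1, p.2 ++ [char])) (ws, cur)
    = (ws ++ (pvGL cur toks).1, (pvGL cur toks).2) := by
  induction toks generalizing ws cur with
  | nil => simp [pvGL]
  | cons t r ih =>
      simp only [List.foldl_cons, pvGL]
      by_cases h : PySem.Str.endswith t "@" = true
      · rw [if_pos h, if_pos h, ih]
        simp
      · rw [if_neg h, if_neg h, ih]

theorem charsJoin_nil_append (xs : List (List Char)) (y : List Char) :
    PySem.Chars.join [] (xs ++ [y]) = PySem.Chars.join [] xs ++ y := by
  induction xs with
  | nil => simp [PySem.Chars.join_nil, PySem.Chars.join_singleton]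
  | cons a r ih =>
      cases r with
      | nil => simp [PySem.Chars.join_singleton, PySem.Chars.join_cons_cons]
      | cons b r' =>
          have h1 : (a :: b :: r') ++ [y] = a :: (b :: (r' ++ [y])) := by simp
          rw [h1, PySem.Chars.join_cons_cons]
          have h2 : b :: (r' ++ [y]) = (b :: r') ++ [y] := by simp
          rw [h2, ih, PySem.Chars.join_cons_cons]
          simp

theorem join_empty_append (xs : List String) (y : String) :
    PySem.Str.join "" (xs ++ [y]) = PySem.Str.join "" xs ++ y := by
  apply String.toList_inj.mp
  simp only [PySem.Str.toList_join, List.map_append, List.map_cons, List.map_nil,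
    String.toList_append]
  simpa using charsJoin_nil_append (xs.map String.toList) y.toList

theorem pyFindAt_shift (k : Nat) (toks : List String) :
    pyFindAt (k + 1) toks = Option.map (fun p : Nat × String => (p.1 + 1, p.2)) (pyFindAt k toks) := by
  induction toks generalizing k with
  | nil => simp [pyFindAt]
  | cons t r ih =>
      simp only [pyFindAt]
      by_cases h : PySem.Str.endswith t "@" = true
      · rw [if_pos h, if_pos h]
        simp
      · rw [if_neg h, if_neg h]
        exact ih (k + 1)

theorem pvGL_eq (toks : List String) (cur : List String) :
    (pvGL cur toks).1 =
      match pyFindAt 0 toks with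
      | none => []
      | some (j, t) =>
          (PySem.Str.join "" (cur ++ toks.take j ++ [PySem.Str.slice t none (some (-1))])) ::
            (pvGL [] (toks.drop (j + 1))).1 := by
  induction toks generalizing cur with
  | nil => simp [pvGL, pyFindAt]
  | cons t r ih =>
      simp only [pvGL, pyFindAt]
      by_cases h : PySem.Str.endswith t "@" = true
      · rw [if_pos h, if_pos h]
        simp
      · rw [if_neg h, if_neg h, ih (cur ++ [t]), pyFindAt_shift 0 r]
        cases hf : pyFindAt 0 r with
        | none => simp
        | some p =>
            cases p with
            | mk j s =>
                simp [List.take_succ_cons]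

theorem goB_eq_pvGL (toks : List String) (words : List String) :
    goB words toks = PySem.Str.join " " (words ++ (pvGL [] toks).1) := by
  induction hn : toks.length using Nat.strong_induction_on generalizing toks words with
  | _ n ih =>
    rw [goB]
    split
    next h =>
        have hGL := pvGL_eq toks []
        rw [h] at hGL
        simp only [hGL, List.append_nil]
    next j t h =>
          have hj := pyFindAt_lt 0 toks j t h
          have hc : ((j : Int) + 1) = ((j + 1 : Nat) : Int) := by push_cast; ring
          rw [hc, PySem.List.slice_from_natCast, PySem.List.slice_to_natCast]
          have hlen : (toks.drop (j + 1)).length < n := by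
            subst hn
            simp only [List.length_drop]; omega
          rw [ih _ hlen (toks.drop (j + 1)) _ rfl]
          have hGL := pvGL_eq toks []
          rw [h] at hGL
          simp only [List.nil_append] at hGL
          rw [hGL, join_empty_append]
          simp

-- ===== VERDICT (by name: the statement is the Claim_ definition above) =====
theorem compress_words_spec : Claim_equal_compress_words := by
  intro utt _
  unfold Spec_compress_words compress_words compress_words_alt
  rw [foldA_eq, goB_eq_pvGL]
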